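-- pv_equiv track=rewrite | github.com/urja-hub/Data-Structures-and-Algorithms | Stalin sort.py | stalin_sort_in_place
-- ===== SOURCE A (Python) =====
-- def stalin_sort_in_place(nums):
--     i = 1
--     while i < len(nums):
--         if nums[i] < nums[i - 1]:
--             nums.pop(i)
--         else:
--             i += 1
--     return nums
-- ===== SOURCE B (Python) =====
-- def stalin_sort_in_place(nums):
--     # Single forward pass with a write index; truncate once at the end.
--     # Mutates nums in place, like A.
--     k = 0
--     for x in nums:
--         if k == 0 or x >= nums[k - 1]:
--             nums[k] = x
--             k += 1
--     del nums[k:]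
--     return nums
-- ===== Notes on version B (the rewrite author's own statement) =====
-- stated objective: faster
-- what changed: Replaces the pop-at-index loop (each pop shifts the tail, O(n^2) worst case) with a single forward pass using a write index and one final truncation.
import Mathlib
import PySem

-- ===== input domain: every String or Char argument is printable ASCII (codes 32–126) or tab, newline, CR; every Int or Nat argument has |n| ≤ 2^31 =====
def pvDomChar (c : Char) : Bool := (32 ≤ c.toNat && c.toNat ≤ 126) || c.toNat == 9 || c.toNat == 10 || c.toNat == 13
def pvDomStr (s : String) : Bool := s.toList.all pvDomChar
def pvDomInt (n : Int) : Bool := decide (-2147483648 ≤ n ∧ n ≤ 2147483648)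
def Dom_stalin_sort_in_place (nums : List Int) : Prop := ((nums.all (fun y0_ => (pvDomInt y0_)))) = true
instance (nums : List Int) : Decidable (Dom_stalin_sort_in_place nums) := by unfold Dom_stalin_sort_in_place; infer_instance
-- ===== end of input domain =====

-- B replaces A's pop-at-index while-loop with a single forward pass and write index (O(n) vs O(n^2)).
-- Both Pythons mutate `nums` in place to the same final contents; the proof is about the return value.


-- ===== PORT A =====
-- A's while-loop: state is (nums, i); nums.pop(i) is List.eraseIdx (exact: i is in range
-- whenever it is used), nums[i] / nums[i-1] are in-range non-negative indices (i ≥ 1),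
-- so getD is exact there.
def stalinLoopA (nums : List Int) (i : Nat) : List Int :=
  if h : i < nums.length then
    if nums.getD i 0 < nums.getD (i - 1) 0 then
      stalinLoopA (nums.eraseIdx i) i
    else
      stalinLoopA nums (i + 1)
  else nums
termination_by nums.length - i
decreasing_by
  · simp [List.length_eraseIdx, h]; omega
  · omega

def stalin_sort_in_place (nums : List Int) : List Int := stalinLoopA nums 1

-- ===== PORT B =====
-- B's single pass: `last` is nums[k-1] (the last kept element); elements < last are skipped,
-- others are written/kept; the final truncation is implicit (only kept elements are emitted).
def altGo (last : Int) (xs : List Int) : List Int :=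
  match xs with
  | [] => []
  | y :: ys => if y < last then altGo last ys else y :: altGo y ys

def stalin_sort_in_place_alt (nums : List Int) : List Int :=
  match nums with
  | [] => []
  | x :: xs => x :: altGo x xs

-- ===== PRECONDITION & SPEC =====
def Spec_stalin_sort_in_place (nums : List Int) (out : List Int) : Prop := out = stalin_sort_in_place_alt nums
instance (nums : List Int) (out : List Int) : Decidable (Spec_stalin_sort_in_place nums out) := by unfold Spec_stalin_sort_in_place; infer_instance

-- ===== CLAIM (what is proved, stated in full; the proofs are below) =====
def Claim_equal_stalin_sort_in_place : Prop := ∀ (nums : List Int), Dom_stalin_sort_in_place nums → Spec_stalin_sort_in_place nums (stalin_sort_in_place nums)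

-- ===== LEMMAS AND PROOFS =====

-- Loop invariant: with 1 ≤ i, the prefix take i is the kept output so far, nums[i-1] is the
-- last kept element, and the rest of the loop behaves like B's pass over drop i.
theorem stalinLoopA_eq (n : Nat) : ∀ (nums : List Int) (i : Nat), nums.length - i ≤ n → 1 ≤ i →
    stalinLoopA nums i = nums.take i ++ altGo (nums.getD (i - 1) 0) (nums.drop i) := by
  induction n with
  | zero =>
    intro nums i hn hi
    rw [stalinLoopA]
    have h : ¬ i < nums.length := by omega
    simp [h, List.drop_eq_nil_of_le (by omega : nums.length ≤ i), altGo,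
      List.take_of_length_le (by omega : nums.length ≤ i)]
  | succ n ih =>
    intro nums i hn hi
    rw [stalinLoopA]
    by_cases h : i < nums.length
    · simp only [h, dite_true]
      have hdrop : nums.drop i = nums.getD i 0 :: nums.drop (i + 1) := by
        rw [List.getD_eq_getElem _ _ h]
        exact (List.drop_eq_getElem_cons h)
      by_cases hc : nums.getD i 0 < nums.getD (i - 1) 0
      · simp only [hc, if_true]
        have herase : nums.eraseIdx i = nums.take i ++ nums.drop (i + 1) :=
          List.eraseIdx_eq_take_drop_succ nums i
        have hlen : (nums.eraseIdx i).length = nums.length - 1 := by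
          simp [List.length_eraseIdx, h]
        rw [ih (nums.eraseIdx i) i (by omega) hi]
        have htk : (nums.eraseIdx i).take i = nums.take i := by
          rw [herase, List.take_append_of_le_length (by rw [List.length_take]; omega)]
          simp
        have hgd : (nums.eraseIdx i).getD (i - 1) 0 = nums.getD (i - 1) 0 := by
          simp [List.getD_eq_getElem?_getD,
            List.getElem?_eraseIdx_of_lt (show i - 1 < i by omega)]
        have hnil : (nums.take i).drop i = [] :=
          List.drop_eq_nil_of_le (by rw [List.length_take]; omega)
        have hdr : (nums.eraseIdx i).drop i = nums.drop (i + 1) := by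
          rw [herase, List.drop_append_of_le_length (by rw [List.length_take]; omega),
            hnil, List.nil_append]
        rw [htk, hgd, hdr, hdrop]
        simp only [altGo, if_pos hc]
      · simp only [hc, if_false]
        rw [ih nums (i + 1) (by omega) (by omega)]
        have htk : nums.take (i + 1) = nums.take i ++ [nums.getD i 0] := by
          rw [List.getD_eq_getElem _ _ h]
          exact List.take_succ_eq_append_getElem h
        rw [htk, hdrop, Nat.add_sub_cancel]
        simp only [altGo, if_neg hc]
        simp
    · simp only [h, dite_false]
      simp [List.drop_eq_nil_of_le (by omega : nums.length ≤ i), altGo,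
        List.take_of_length_le (by omega : nums.length ≤ i)]

-- ===== VERDICT (by name: the statement is the Claim_ definition above) =====
theorem stalin_sort_in_place_spec : Claim_equal_stalin_sort_in_place := by
  intro nums _
  unfold Spec_stalin_sort_in_place stalin_sort_in_place stalin_sort_in_place_alt
  cases nums with
  | nil => rw [stalinLoopA]; simp
  | cons x xs =>
    rw [stalinLoopA_eq (x :: xs).length (x :: xs) 1 (by omega) (by omega)]
    simp
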